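-- pv_equiv track=rewrite | github.com/asmaanouali/web-services-annotation-composition | backend/services/llm_composer.py | _extract_service_id_from_response
-- ===== SOURCE A (Python) =====
-- def _extract_service_id_from_response(response, valid_ids):
--     """Extract a valid service ID from LLM text output."""
--     text = response.strip()
--     # Direct match
--     if text in valid_ids:
--         return text
--     # Search within response
--     for sid in valid_ids:
--         if sid in text:
--             return sid
--     return None
-- ===== SOURCE B (Python) =====
-- def _extract_service_id_from_response(response, valid_ids):
--     """Extract a valid service ID from LLM text output (single pass)."""
--     text = response.strip()
--     candidate = None
--     for sid in valid_ids:
--         if sid == text: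
--             return sid
--         if candidate is None and sid in text:
--             candidate = sid
--     return candidate
-- ===== Notes on version B (the rewrite author's own statement) =====
-- stated objective: alternative
-- what changed: Replaces the membership test plus a second substring loop with a single pass over valid_ids that returns on an exact match and otherwise records the first substring hit as a pending candidate.
import Mathlib
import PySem

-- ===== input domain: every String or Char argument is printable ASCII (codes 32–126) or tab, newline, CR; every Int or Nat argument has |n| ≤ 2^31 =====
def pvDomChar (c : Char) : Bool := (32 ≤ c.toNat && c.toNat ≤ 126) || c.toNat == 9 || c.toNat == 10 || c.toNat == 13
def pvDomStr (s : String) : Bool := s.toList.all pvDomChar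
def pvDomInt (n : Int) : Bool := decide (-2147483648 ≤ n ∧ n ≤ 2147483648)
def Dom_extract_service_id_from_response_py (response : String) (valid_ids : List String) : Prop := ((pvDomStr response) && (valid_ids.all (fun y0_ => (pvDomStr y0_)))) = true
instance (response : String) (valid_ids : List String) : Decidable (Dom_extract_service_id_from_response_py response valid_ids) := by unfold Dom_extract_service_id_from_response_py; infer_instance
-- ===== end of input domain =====

-- B is a single pass over valid_ids (exact match returns immediately, first substring hit is kept
-- as a pending candidate) instead of A's membership test followed by a second substring loop.

-- ===== PORT A =====
-- A's 'for sid in valid_ids: if sid in text: return sid' loop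
def pvASearch (text : String) : List String → Option String
  | [] => none
  | sid :: rest => if PySem.Str.isIn sid text then some sid else pvASearch text rest

def extract_service_id_from_response_py (response : String) (valid_ids : List String) : Option String :=
  let text := PySem.Str.strip response
  if valid_ids.contains text then some text
  else pvASearch text valid_ids

-- ===== PORT B =====
-- B's single loop carrying the pending candidate
def pvBScan (text : String) : List String → Option String → Option String
  | [], cand => cand
  | sid :: rest, cand =>
      if sid == text then some sid
      else if cand.isNone && PySem.Str.isIn sid text then pvBScan text rest (some sid)
      else pvBScan text rest cand

def extract_service_id_from_response_py_alt (response : String) (valid_ids : List String) : Option String :=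
  pvBScan (PySem.Str.strip response) valid_ids none

-- ===== PRECONDITION & SPEC =====
def Spec_extract_service_id_from_response_py (response : String) (valid_ids : List String) (out : Option String) : Prop := out = extract_service_id_from_response_py_alt response valid_ids
instance (response : String) (valid_ids : List String) (out : Option String) : Decidable (Spec_extract_service_id_from_response_py response valid_ids out) := by unfold Spec_extract_service_id_from_response_py; infer_instance

-- ===== CLAIM (what is proved, stated in full; the proofs are below) =====
def Claim_equal_extract_service_id_from_response_py : Prop := ∀ (response : String) (valid_ids : List String), Dom_extract_service_id_from_response_py response valid_ids → Spec_extract_service_id_from_response_py response valid_ids (extract_service_id_from_response_py response valid_ids)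

-- ===== LEMMAS AND PROOFS =====

-- characterisation of B's scan: exact match wins, otherwise an already-recorded
-- candidate, otherwise A's substring search
theorem pvBScan_eq (text : String) (l : List String) (cand : Option String) :
    pvBScan text l cand =
      if l.contains text then some text
      else match cand with
        | some c => some c
        | none => pvASearch text l := by
  induction l generalizing cand with
  | nil => cases cand <;> simp [pvBScan, pvASearch]
  | cons sid rest ih =>
    by_cases h : sid = text
    · subst h
      simp [pvBScan]
    · have hb : (sid == text) = false := beq_false_of_ne h
      have hb' : (text == sid) = false := beq_false_of_ne (Ne.symm h)
      cases cand with
      | some c =>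
        rw [show pvBScan text (sid :: rest) (some c) = pvBScan text rest (some c) from by
              simp [pvBScan, hb], ih]
        simp [Ne.symm h]
      | none =>
        by_cases hin : PySem.Chars.isIn sid.toList text.toList = true
        · rw [show pvBScan text (sid :: rest) none = pvBScan text rest (some sid) from by
                simp [pvBScan, hb, hin], ih]
          simp [Ne.symm h, pvASearch, hin]
        · have hin' : PySem.Chars.isIn sid.toList text.toList = false := by
            simpa using hin
          rw [show pvBScan text (sid :: rest) none = pvBScan text rest none from by
                simp [pvBScan, hb, hin'], ih]
          simp [Ne.symm h, pvASearch, hin']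

-- ===== VERDICT (by name: the statement is the Claim_ definition above) =====
theorem extract_service_id_from_response_py_spec : Claim_equal_extract_service_id_from_response_py := by
  intro response valid_ids _
  unfold Spec_extract_service_id_from_response_py
  unfold extract_service_id_from_response_py extract_service_id_from_response_py_alt
  rw [pvBScan_eq]
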